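-- pv_equiv track=rewrite | github.com/yeardream-high6/coding_test | 이부경/LeetCode/916. Word Subsets.py | wordSubsets
-- ===== SOURCE A (Python) =====
-- from typing import List
-- from collections import Counter
--
-- def wordSubsets(words1: List[str], words2: List[str]) -> List[str]:
--     output = []
--     w2_counter = Counter()
--     for counter in [Counter(w2) for w2 in words2]:
--         for c in counter:
--             w2_counter[c] = max(w2_counter[c], counter[c])
--
--     for word1 in words1:
--         w1_counter = Counter(word1)
--         for w2 in w2_counter:
--             if w2_counter[w2] > w1_counter[w2]:
--                 break
--         else:
--             output.append(word1)
--     return output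
-- ===== SOURCE B (Python) =====
-- from typing import List
--
-- def wordSubsets(words1: List[str], words2: List[str]) -> List[str]:
--     # Per-word2 sub-multiset check against each word1; no merged max-count table.
--     def covers(w1: str, w2: str) -> bool:
--         return all(w1.count(c) >= w2.count(c) for c in w2)
--     return [w1 for w1 in words1 if all(covers(w1, w2) for w2 in words2)]
-- ===== Notes on version B (the rewrite author's own statement) =====
-- stated objective: alternative
-- what changed: B drops A's merged max-count Counter table entirely and instead filters words1 by checking, per word, that every words2 word is individually contained as a character sub-multiset (per-character count comparison), trading the precomputed requirement table for direct repeated scans.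
import Mathlib
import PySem

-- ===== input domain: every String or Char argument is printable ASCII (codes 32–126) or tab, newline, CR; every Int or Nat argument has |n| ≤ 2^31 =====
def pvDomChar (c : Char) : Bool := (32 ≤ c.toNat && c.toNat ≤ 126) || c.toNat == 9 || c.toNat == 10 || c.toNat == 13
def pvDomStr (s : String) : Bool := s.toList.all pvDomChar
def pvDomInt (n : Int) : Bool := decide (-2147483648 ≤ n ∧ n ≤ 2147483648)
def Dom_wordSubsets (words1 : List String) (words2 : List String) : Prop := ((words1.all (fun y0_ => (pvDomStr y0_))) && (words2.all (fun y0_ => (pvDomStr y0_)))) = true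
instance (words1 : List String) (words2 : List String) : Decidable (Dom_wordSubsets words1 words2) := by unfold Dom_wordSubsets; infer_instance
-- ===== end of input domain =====

-- B is an alternative decomposition (per-word2 sub-multiset checks instead of A's merged
-- max-count table); same results, no speed claim.

-- ===== PORT A =====
-- inner merge loop: 'for c in counter: w2_counter[c] = max(w2_counter[c], counter[c])'
def pvMergeOne (d : PySem.Dict Char Int) (c : PySem.Dict Char Int) : PySem.Dict Char Int :=
  c.keys.foldl (fun d k => d.insert k (max (d.getD k 0) (c.getD k 0))) d

-- the 'for w2 in w2_counter: if …: break / else: append' loop, as a Bool (break ↦ false)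
def pvCheckKeys (ks : List Char) (w2c w1c : PySem.Dict Char Int) : Bool :=
  match ks with
  | [] => true
  | k :: rest => if w2c.getD k 0 > w1c.getD k 0 then false else pvCheckKeys rest w2c w1c

def wordSubsets (words1 : List String) (words2 : List String) : List String :=
  let w2Counter := (words2.map (fun w2 => PySem.Dict.counter w2.toList)).foldl pvMergeOne PySem.Dict.empty
  words1.foldl
    (fun output word1 =>
      let w1Counter := PySem.Dict.counter word1.toList
      if pvCheckKeys w2Counter.keys w2Counter w1Counter then output ++ [word1] else output)
    []

-- ===== PORT B =====
-- 'all(w1.count(c) >= w2.count(c) for c in w2)'; str.count with a single-char needle is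
-- exactly the character count, ported as List.count on toList.
def pvCovers (w1 : String) (w2 : String) : Bool :=
  w2.toList.all (fun c => decide (w2.toList.count c ≤ w1.toList.count c))

def wordSubsets_alt (words1 : List String) (words2 : List String) : List String :=
  words1.filter (fun w1 => words2.all (fun w2 => pvCovers w1 w2))

-- ===== PRECONDITION & SPEC =====
def Spec_wordSubsets (words1 : List String) (words2 : List String) (out : List String) : Prop := out = wordSubsets_alt words1 words2
instance (words1 : List String) (words2 : List String) (out : List String) : Decidable (Spec_wordSubsets words1 words2 out) := by unfold Spec_wordSubsets; infer_instance

-- ===== CLAIM (what is proved, stated in full; the proofs are below) =====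
def Claim_equal_wordSubsets : Prop := ∀ (words1 : List String) (words2 : List String), Dom_wordSubsets words1 words2 → Spec_wordSubsets words1 words2 (wordSubsets words1 words2)

-- ===== LEMMAS AND PROOFS =====

-- the break/else loop is an 'all' over the keys
lemma pvCheckKeys_eq_all (ks : List Char) (a b : PySem.Dict Char Int) :
    pvCheckKeys ks a b = ks.all (fun k => decide (a.getD k 0 ≤ b.getD k 0)) := by
  induction ks with
  | nil => rfl
  | cons k rest ih =>
      simp only [pvCheckKeys, List.all_cons, ih]
      by_cases h : a.getD k 0 > b.getD k 0
      · simp [h]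
      · simp [not_lt.mp h]

-- one inner merge pass, as a pointwise max (no Nodup needed: max is idempotent)
lemma foldl_insert_max_getD (ks : List Char) (v : Char → Int) (d : PySem.Dict Char Int) (k : Char) :
    (ks.foldl (fun d x => d.insert x (max (d.getD x 0) (v x))) d).getD k 0 =
      if k ∈ ks then max (d.getD k 0) (v k) else d.getD k 0 := by
  induction ks generalizing d with
  | nil => simp
  | cons x rest ih =>
      simp only [List.foldl_cons, ih, PySem.Dict.getD_insert, List.mem_cons]
      by_cases hx : k = x
      · subst hx
        by_cases hm : k ∈ rest
        · simp [hm]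
        · simp [hm]
      · by_cases hm : k ∈ rest
        · simp [hx, hm]
        · simp [hx, hm]

-- the whole merge phase: merged value at k is the running max of the per-word counts
lemma merged_getD (ws : List String) (d : PySem.Dict Char Int) (k : Char)
    (hd : 0 ≤ d.getD k 0) :
    ((ws.map (fun w => PySem.Dict.counter w.toList)).foldl pvMergeOne d).getD k 0 =
      ws.foldl (fun acc w => max acc ((w.toList.count k : Int))) (d.getD k 0) := by
  induction ws generalizing d with
  | nil => simp
  | cons w rest ih =>
      simp only [List.map_cons, List.foldl_cons]
      have hstep : (pvMergeOne d (PySem.Dict.counter w.toList)).getD k 0 =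
          max (d.getD k 0) ((w.toList.count k : Int)) := by
        unfold pvMergeOne
        rw [foldl_insert_max_getD]
        by_cases hm : k ∈ (PySem.Dict.counter w.toList).keys
        · rw [if_pos hm, PySem.Dict.getD_counter]
        · have hk : k ∉ w.toList := by
            intro h
            exact hm (by simp [PySem.Dict.keys_counter, PySem.Set.mem_ofList, h])
          rw [if_neg hm, List.count_eq_zero_of_not_mem hk]
          simp
          omega
      rw [ih (d := pvMergeOne d (PySem.Dict.counter w.toList)) (by rw [hstep]; positivity),
          hstep]

-- a running max over Int is ≤ M iff every entry is
lemma foldl_max_le_iff (ws : List String) (f : String → Int) (a M : Int) :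
    ws.foldl (fun acc w => max acc (f w)) a ≤ M ↔ a ≤ M ∧ ∀ w ∈ ws, f w ≤ M := by
  induction ws generalizing a with
  | nil => simp
  | cons w rest ih =>
      simp only [List.foldl_cons, ih, max_le_iff, List.mem_cons]
      constructor
      · rintro ⟨⟨h1, h2⟩, h3⟩
        exact ⟨h1, fun x hx => by rcases hx with rfl | hx; exact h2; exact h3 x hx⟩
      · rintro ⟨h1, h2⟩
        exact ⟨⟨h1, h2 w (Or.inl rfl)⟩, fun x hx => h2 x (Or.inr hx)⟩

-- per-word equivalence of the two membership tests
lemma check_eq_covers (words2 : List String) (w1 : String) :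
    pvCheckKeys ((words2.map (fun w => PySem.Dict.counter w.toList)).foldl pvMergeOne PySem.Dict.empty).keys
      ((words2.map (fun w => PySem.Dict.counter w.toList)).foldl pvMergeOne PySem.Dict.empty)
      (PySem.Dict.counter w1.toList) =
    words2.all (fun w2 => pvCovers w1 w2) := by
  set w2c := (words2.map (fun w => PySem.Dict.counter w.toList)).foldl pvMergeOne PySem.Dict.empty with hw2c
  have hval : ∀ k, w2c.getD k 0 =
      words2.foldl (fun acc w => max acc ((w.toList.count k : Int))) 0 := by
    intro k
    rw [hw2c, merged_getD] <;> simp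
  rw [pvCheckKeys_eq_all, Bool.eq_iff_iff]
  simp only [List.all_eq_true, decide_eq_true_eq, PySem.Dict.getD_counter, pvCovers]
  have hA : (∀ k ∈ w2c.keys, w2c.getD k 0 ≤ ((w1.toList.count k : Int))) ↔
      (∀ k, w2c.getD k 0 ≤ ((w1.toList.count k : Int))) := by
    constructor
    · intro h k
      by_cases hm : k ∈ w2c.keys
      · exact h k hm
      · have hc : w2c.contains k = false := by
          rw [← Bool.not_eq_true, PySem.Dict.contains_iff_mem_keys]
          simpa using hm
        rw [PySem.Dict.getD_of_not_contains _ _ hc]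
        positivity
    · exact fun h k _ => h k
  rw [hA]
  constructor
  · intro h w2 hw2 k hk
    have := h k
    rw [hval k, foldl_max_le_iff] at this
    exact_mod_cast this.2 w2 hw2
  · intro h k
    rw [hval k, foldl_max_le_iff]
    refine ⟨by positivity, fun w hw => ?_⟩
    by_cases hk : k ∈ w.toList
    · exact_mod_cast h w hw k hk
    · rw [List.count_eq_zero_of_not_mem hk]
      positivity

-- ===== VERDICT (by name: the statement is the Claim_ definition above) =====
theorem wordSubsets_spec : Claim_equal_wordSubsets := by
  intro words1 words2 _
  unfold Spec_wordSubsets wordSubsets wordSubsets_alt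
  simp only [PySem.List.foldl_append_if_eq_filter, List.nil_append]
  apply List.filter_congr
  intro w1 _
  exact check_eq_covers words2 w1
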